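/- GENERATED by farm/mkstatement.py from design/units.tsv (unit `DGifDecompressLine.COMPOSITION`) and the Specs of Gif/Spec/*.lean — do not edit.
   THE STATEMENT of the proof unit `DGifDecompressLine.COMPOSITION`: the function `DGifDecompressLine` (362 instructions) satisfies its contract,
   GIVEN THE STATEMENTS OF ITS 17 SEGMENTS (`Gif.Spec.DGifDecompressLine.Seg<k> Lay μ u₀`: what the unit `DGifDecompressLine.<k>` proves).
   No machine code is walked: `ReachVia.trans` along the segments (the exit assertion of a segment is the entry assertion of
   its successor), an induction on the loop measures. What the names mean: ProgX/Base/Spec/Basic.lean. The theorem to prove: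
   `theorem DGifDecompressLine_COMPOSITION_ok : Gif.Spec.DGifDecompressLine_COMPOSITION.Statement`. -/
import Gif.Code
import Gif.Dec.All
import Gif.Labels
import Gif.Spec.Lzw
import Gif.Spec.Seg_DGifDecompressLine
namespace Gif.Spec.DGifDecompressLine_COMPOSITION
open X86 X86.User Asan

/-- The statement of unit `DGifDecompressLine.COMPOSITION`. -/
def Statement : Prop :=
  ∀ (Lay : Layout) (_hLay : Lay.hi = 0x1000000) (μ : Microarch) (_hμ : UserX.MicroOK μ) (u₀ : State)
    (_h_DGifDecompressLine_P : Gif.Spec.DGifDecompressLine.SegP Lay μ u₀)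
    (_h_DGifDecompressLine_1 : Gif.Spec.DGifDecompressLine.Seg1 Lay μ u₀)
    (_h_DGifDecompressLine_2 : Gif.Spec.DGifDecompressLine.Seg2 Lay μ u₀)
    (_h_DGifDecompressLine_3 : Gif.Spec.DGifDecompressLine.Seg3 Lay μ u₀)
    (_h_DGifDecompressLine_4 : Gif.Spec.DGifDecompressLine.Seg4 Lay μ u₀)
    (_h_DGifDecompressLine_5 : Gif.Spec.DGifDecompressLine.Seg5 Lay μ u₀)
    (_h_DGifDecompressLine_6 : Gif.Spec.DGifDecompressLine.Seg6 Lay μ u₀)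
    (_h_DGifDecompressLine_7 : Gif.Spec.DGifDecompressLine.Seg7 Lay μ u₀)
    (_h_DGifDecompressLine_8 : Gif.Spec.DGifDecompressLine.Seg8 Lay μ u₀)
    (_h_DGifDecompressLine_9 : Gif.Spec.DGifDecompressLine.Seg9 Lay μ u₀)
    (_h_DGifDecompressLine_10 : Gif.Spec.DGifDecompressLine.Seg10 Lay μ u₀)
    (_h_DGifDecompressLine_11 : Gif.Spec.DGifDecompressLine.Seg11 Lay μ u₀)
    (_h_DGifDecompressLine_12 : Gif.Spec.DGifDecompressLine.Seg12 Lay μ u₀)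
    (_h_DGifDecompressLine_13 : Gif.Spec.DGifDecompressLine.Seg13 Lay μ u₀)
    (_h_DGifDecompressLine_14 : Gif.Spec.DGifDecompressLine.Seg14 Lay μ u₀)
    (_h_DGifDecompressLine_15 : Gif.Spec.DGifDecompressLine.Seg15 Lay μ u₀)
    (_h_DGifDecompressLine_E : Gif.Spec.DGifDecompressLine.SegE Lay μ u₀),
    ∀ (H : Heap) (rest : List Obj) (frames : List (Nat × FrameLayout)) (F : Forest) (R : Rd) (n : Nat), Calls Lay μ ProgX.Base.WayInv (ProgX.Base.conv u₀) Gif.L.DGifDecompressLine.entry (Gif.Spec.DGifDecompressLine.spec H rest frames F R n)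

end Gif.Spec.DGifDecompressLine_COMPOSITION
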